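-- pv_equiv track=rewrite | github.com/Keeper-Security/Commander | keepercommander/commands/supershell/renderers/record.py | strip_field_type_prefix
-- ===== SOURCE A (Python) =====
-- FIELD_TYPE_PREFIXES = (
--     'text:', 'multiline:', 'url:', 'phone:', 'email:',
--     'secret:', 'date:', 'name:', 'host:', 'address:'
-- )
--
-- TYPE_FRIENDLY_NAMES = {
--     'text:': 'Text',
--     'multiline:': 'Note',
--     'url:': 'URL',
--     'phone:': 'Phone',
--     'email:': 'Email',
--     'secret:': 'Secret',
--     'date:': 'Date',
--     'name:': 'Name',
--     'host:': 'Host',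
--     'address:': 'Address',
-- }
--
-- def strip_field_type_prefix(key: str) -> str:
--     """Strip type prefix from field name (e.g., 'text:Label' -> 'Label').
--
--     Args:
--         key: Field name potentially with type prefix
--
--     Returns:
--         Display name without type prefix
--     """
--     for prefix in FIELD_TYPE_PREFIXES:
--         if key.lower().startswith(prefix):
--             display_key = key[len(prefix):]
--             if not display_key:
--                 # Use friendly name based on type
--                 display_key = TYPE_FRIENDLY_NAMES.get(prefix, prefix.rstrip(':').title())
--             return display_key
--     return key
-- ===== SOURCE B (Python) =====
-- TYPE_FRIENDLY_NAMES = {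
--     'text:': 'Text',
--     'multiline:': 'Note',
--     'url:': 'URL',
--     'phone:': 'Phone',
--     'email:': 'Email',
--     'secret:': 'Secret',
--     'date:': 'Date',
--     'name:': 'Name',
--     'host:': 'Host',
--     'address:': 'Address',
-- }
--
--
-- def strip_field_type_prefix(key: str) -> str:
--     """Strip type prefix from field name via a single ':' split + dict lookup."""
--     idx = key.find(':')
--     if idx == -1:
--         return key
--     friendly = TYPE_FRIENDLY_NAMES.get(key[:idx + 1].lower())
--     if friendly is None:
--         return key
--     display = key[idx + 1:]
--     return display if display else friendly
-- ===== Notes on version B (the rewrite author's own statement) =====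
-- stated objective: simpler
-- what changed: Replaces A's scan over the ten known type prefixes with startswith tests by a single search for the first colon, one lowercased slice and one dict lookup.
import Mathlib
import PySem

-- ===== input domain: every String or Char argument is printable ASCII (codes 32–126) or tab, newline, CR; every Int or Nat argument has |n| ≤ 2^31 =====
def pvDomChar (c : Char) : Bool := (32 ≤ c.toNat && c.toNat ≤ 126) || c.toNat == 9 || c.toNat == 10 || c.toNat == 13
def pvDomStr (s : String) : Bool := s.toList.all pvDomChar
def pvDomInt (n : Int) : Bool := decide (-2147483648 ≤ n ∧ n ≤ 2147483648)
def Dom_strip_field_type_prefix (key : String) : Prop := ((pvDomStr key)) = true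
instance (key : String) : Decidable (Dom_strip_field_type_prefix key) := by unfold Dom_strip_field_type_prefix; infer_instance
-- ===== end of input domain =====

-- B replaces A's scan over the ten type prefixes by one find(':') + slice + dict lookup (simpler, same result).

-- ===== PORT A =====
def pvPrefixesA : List (List Char) :=
  ["text:".toList, "multiline:".toList, "url:".toList, "phone:".toList, "email:".toList,
   "secret:".toList, "date:".toList, "name:".toList, "host:".toList, "address:".toList]

def pvFriendlyA : PySem.Dict (List Char) (List Char) :=
  PySem.Dict.ofList
    [("text:".toList, "Text".toList), ("multiline:".toList, "Note".toList),
     ("url:".toList, "URL".toList), ("phone:".toList, "Phone".toList),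
     ("email:".toList, "Email".toList), ("secret:".toList, "Secret".toList),
     ("date:".toList, "Date".toList), ("name:".toList, "Name".toList),
     ("host:".toList, "Host".toList), ("address:".toList, "Address".toList)]

-- hand port of p.rstrip(':') (PySem has no rstrip-with-chars; exact: strips all trailing ':')
def pvRstripColon (p : List Char) : List Char := (p.reverse.dropWhile (· = ':')).reverse

-- hand port of str.title() (exact on ASCII, where a "cased" char is an alphabetic one):
-- uppercase a letter after a non-letter, lowercase a letter after a letter
def pvTitle : List Char → Bool → List Char
  | [], _ => []
  | c :: cs, prev =>
    (if PySem.Chars.isalpha c then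
       (if prev then PySem.Chars.lowerChar c else PySem.Chars.upperChar c)
     else c) :: pvTitle cs (PySem.Chars.isalpha c)

def stripA_go (key : List Char) : List (List Char) → List Char
  | [] => key
  | p :: ps =>
    if PySem.Chars.startswith (PySem.Chars.lower key) p then
      let d := PySem.List.slice key (some (p.length : Int)) none
      if d = [] then PySem.Dict.getD pvFriendlyA p (pvTitle (pvRstripColon p) false) else d
    else stripA_go key ps

def strip_field_type_prefix (key : String) : String :=
  String.ofList (stripA_go key.toList pvPrefixesA)

-- ===== PORT B =====
def pvFriendlyB : PySem.Dict (List Char) (List Char) :=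
  PySem.Dict.ofList
    [("text:".toList, "Text".toList), ("multiline:".toList, "Note".toList),
     ("url:".toList, "URL".toList), ("phone:".toList, "Phone".toList),
     ("email:".toList, "Email".toList), ("secret:".toList, "Secret".toList),
     ("date:".toList, "Date".toList), ("name:".toList, "Name".toList),
     ("host:".toList, "Host".toList), ("address:".toList, "Address".toList)]

def stripB_core (cs : List Char) : List Char :=
  let idx := PySem.Chars.find cs [':']
  if idx = -1 then cs
  else
    match PySem.Dict.get? pvFriendlyB (PySem.Chars.lower (PySem.List.slice cs none (some (idx + 1)))) with
    | none => cs
    | some friendly =>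
      let display := PySem.List.slice cs (some (idx + 1)) none
      if display = [] then friendly else display

def strip_field_type_prefix_alt (key : String) : String :=
  String.ofList (stripB_core key.toList)

-- ===== PRECONDITION & SPEC =====
def Spec_strip_field_type_prefix (key : String) (out : String) : Prop := out = strip_field_type_prefix_alt key
instance (key : String) (out : String) : Decidable (Spec_strip_field_type_prefix key out) := by unfold Spec_strip_field_type_prefix; infer_instance

-- ===== CLAIM (what is proved, stated in full; the proofs are below) =====
def Claim_equal_strip_field_type_prefix : Prop := ∀ (key : String), Dom_strip_field_type_prefix key → Spec_strip_field_type_prefix key (strip_field_type_prefix key)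

-- ===== LEMMAS AND PROOFS =====

theorem pvLowerChar_eq_colon_iff (c : Char) : PySem.Chars.lowerChar c = ':' ↔ c = ':' := by
  unfold PySem.Chars.lowerChar PySem.Chars.isupper
  split_ifs with h
  · simp only [Bool.and_eq_true, decide_eq_true_eq] at h
    have hlo : 'A'.toNat ≤ c.toNat := h.1
    have hhi : c.toNat ≤ 'Z'.toNat := h.2
    have hA : 'A'.toNat = 65 := rfl
    have hZ : 'Z'.toNat = 90 := rfl
    constructor
    · intro he
      have hv : (Char.ofNat (c.toNat + 32)).toNat = c.toNat + 32 := by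
        unfold Char.ofNat
        split
        · rfl
        · next hv => exact absurd (Or.inl (by omega)) hv
      have hq := congrArg Char.toNat he
      rw [hv] at hq
      have hcolon : (':' : Char).toNat = 58 := rfl
      rw [hcolon] at hq
      omega
    · intro he
      subst he
      exfalso
      have : (':' : Char).toNat = 58 := rfl
      omega
  · exact Iff.rfl

theorem pvLower_getElem? (cs : List Char) (j : Nat) :
    (PySem.Chars.lower cs)[j]? = cs[j]?.map PySem.Chars.lowerChar := by
  have h : PySem.Chars.lower cs = cs.map PySem.Chars.lowerChar := rfl
  rw [h, List.getElem?_map]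

theorem pvColon_prefix_drop (cs : List Char) (j : Nat) :
    [':'] <+: cs.drop j ↔ cs[j]? = some ':' := by
  constructor
  · rintro ⟨t, ht⟩
    have h0 : (cs.drop j)[0]? = some ':' := by rw [← ht]; rfl
    rwa [List.getElem?_drop, Nat.add_zero] at h0
  · intro h
    have hj : j < cs.length := (List.getElem?_eq_some_iff.mp h).1
    refine ⟨cs.drop (j + 1), ?_⟩
    rw [List.drop_eq_getElem_cons hj]
    simp only [List.singleton_append]
    congr 1
    exact ((List.getElem?_eq_some_iff.mp h).2).symm

theorem pvFind_colon_eq (cs : List Char) (n : Nat) (h1 : cs[n]? = some ':')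
    (h2 : ∀ j < n, cs[j]? ≠ some ':') : PySem.Chars.find cs [':'] = (n : Int) := by
  have hIn : PySem.Chars.isIn [':'] cs = true :=
    (PySem.Chars.exists_prefix_drop_iff_isIn _ _).mp ⟨n, (pvColon_prefix_drop cs n).mpr h1⟩
  have h0 : 0 ≤ PySem.Chars.find cs [':'] :=
    (PySem.Chars.find_nonneg_iff _ _).mpr ((PySem.Chars.isIn_iff_infix _ _).mp hIn)
  obtain ⟨hp, hmin⟩ := PySem.Chars.find_spec h0
  have hf : (PySem.Chars.find cs [':']).toNat = n := by
    rcases Nat.lt_trichotomy (PySem.Chars.find cs [':']).toNat n with hlt | heq | hgt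
    · exact absurd ((pvColon_prefix_drop cs _).mp hp) (h2 _ hlt)
    · exact heq
    · exact absurd ((pvColon_prefix_drop cs n).mpr h1) (hmin n hgt)
  omega

theorem pvStripB_matched (cs p fr : List Char) (n : Nat) (hn : p.length = n) (hpos : 0 < n)
    (hlast : p[n - 1]? = some ':') (hmid : ∀ j, j < n - 1 → p[j]? ≠ some ':')
    (hget : PySem.Dict.get? pvFriendlyB p = some fr)
    (hpre : PySem.Chars.startswith (PySem.Chars.lower cs) p = true) :
    stripB_core cs = if cs.drop n = [] then fr else cs.drop n := by
  have hps : p <+: PySem.Chars.lower cs := (PySem.Chars.startswith_iff _ _).mp hpre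
  have htake : p = (PySem.Chars.lower cs).take n := by
    rw [← hn]; exact List.prefix_iff_eq_take.mp hps
  have hlow : ∀ j, j < n → (PySem.Chars.lower cs)[j]? = p[j]? := by
    intro j hj
    rw [htake, List.getElem?_take_of_lt hj]
  have hcs : ∀ j, j < n → (cs[j]? = some ':' ↔ p[j]? = some ':') := by
    intro j hj
    rw [← hlow j hj, pvLower_getElem?]
    cases hc : cs[j]? with
    | none => simp
    | some c => simp [pvLowerChar_eq_colon_iff c]
  have h1 : cs[n - 1]? = some ':' := (hcs (n - 1) (by omega)).mpr hlast
  have h2 : ∀ j < n - 1, cs[j]? ≠ some ':' := by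
    intro j hj hc
    exact hmid j hj ((hcs j (by omega)).mp hc)
  have hfind : PySem.Chars.find cs [':'] = ((n - 1 : Nat) : Int) := pvFind_colon_eq cs (n - 1) h1 h2
  have hlen : n - 1 < cs.length := (List.getElem?_eq_some_iff.mp h1).1
  unfold stripB_core
  rw [hfind]
  have hne : ((n - 1 : Nat) : Int) ≠ -1 := by omega
  rw [if_neg hne]
  have hcast : ((n - 1 : Nat) : Int) + 1 = ((n : Nat) : Int) := by omega
  rw [hcast, PySem.List.slice_to_natCast, PySem.List.slice_from_natCast]
  have hmt : PySem.Chars.lower (cs.take n) = (PySem.Chars.lower cs).take n := by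
    have h : ∀ l : List Char, PySem.Chars.lower l = l.map PySem.Chars.lowerChar := fun _ => rfl
    rw [h, h, List.map_take]
  rw [hmt, ← htake, hget]

theorem pvStripB_unmatched (cs : List Char)
    (h : ∀ p ∈ pvPrefixesA, PySem.Chars.startswith (PySem.Chars.lower cs) p = false) :
    stripB_core cs = cs := by
  unfold stripB_core
  by_cases hidx : PySem.Chars.find cs [':'] = -1
  · simp [hidx]
  · rw [if_neg hidx]
    have h0 : 0 ≤ PySem.Chars.find cs [':'] := by
      have := PySem.Chars.neg_one_le_find cs [':']
      omega
    have hcast : PySem.Chars.find cs [':'] + 1 = (((PySem.Chars.find cs [':']).toNat + 1 : Nat) : Int) := by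
      omega
    rw [hcast, PySem.List.slice_to_natCast]
    have hkey : ∀ k, PySem.Chars.startswith (PySem.Chars.lower cs) k = false →
        PySem.Chars.lower (cs.take ((PySem.Chars.find cs [':']).toNat + 1)) ≠ k := by
      intro k hk hke
      have hmt : PySem.Chars.lower (cs.take ((PySem.Chars.find cs [':']).toNat + 1)) =
          (PySem.Chars.lower cs).take ((PySem.Chars.find cs [':']).toNat + 1) := by
        have hm : ∀ l : List Char, PySem.Chars.lower l = l.map PySem.Chars.lowerChar := fun _ => rfl
        rw [hm, hm, List.map_take]
      rw [hmt] at hke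
      have : k <+: PySem.Chars.lower cs := hke ▸ List.take_prefix _ _
      rw [(PySem.Chars.startswith_iff _ _).mpr this] at hk
      exact absurd hk (by simp)
    have hne : ∀ p ∈ pvPrefixesA,
        PySem.Chars.lower (cs.take ((PySem.Chars.find cs [':']).toNat + 1)) ≠ p :=
      fun p hp => hkey p (h p hp)
    have hkeys : pvFriendlyB.keys = pvPrefixesA := by decide
    have hnone : PySem.Dict.get? pvFriendlyB
        (PySem.Chars.lower (cs.take ((PySem.Chars.find cs [':']).toNat + 1))) = none := by
      rw [PySem.Dict.get?_eq_none_iff_not_mem_keys, hkeys]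
      intro hmem
      exact hne _ hmem rfl
    rw [hnone]

-- the per-prefix facts B's proof needs, checked once over the ten concrete prefixes
def pvGoodPrefix (p : List Char) : Prop :=
  PySem.Dict.get? pvFriendlyB p =
      some (PySem.Dict.getD pvFriendlyA p (pvTitle (pvRstripColon p) false)) ∧
    0 < p.length ∧ p[p.length - 1]? = some ':' ∧ ∀ j < p.length - 1, p[j]? ≠ some ':'

theorem pvGoodAll : ∀ p ∈ pvPrefixesA, pvGoodPrefix p := by
  intro p hp
  unfold pvGoodPrefix
  fin_cases hp <;> exact ⟨by decide, by decide, by decide, by decide⟩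

theorem pvGo_eq (cs : List Char) (ps : List (List Char))
    (hsub : ∀ p ∈ ps, p ∈ pvPrefixesA)
    (hprev : ∀ p ∈ pvPrefixesA, p ∉ ps → PySem.Chars.startswith (PySem.Chars.lower cs) p = false) :
    stripA_go cs ps = stripB_core cs := by
  induction ps with
  | nil =>
    rw [pvStripB_unmatched cs (fun p hp => hprev p hp (List.not_mem_nil))]
    rfl
  | cons p ps ih =>
    by_cases hp : PySem.Chars.startswith (PySem.Chars.lower cs) p = true
    · obtain ⟨hget, hpos, hlast, hmid⟩ := pvGoodAll p (hsub p List.mem_cons_self)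
      rw [pvStripB_matched cs p
            (PySem.Dict.getD pvFriendlyA p (pvTitle (pvRstripColon p) false))
            p.length rfl hpos hlast hmid hget hp]
      rw [stripA_go, if_pos hp]
      simp only [PySem.List.slice_from_natCast]
    · rw [stripA_go, if_neg hp]
      refine ih (fun q hq => hsub q (List.mem_cons_of_mem p hq)) ?_
      intro q hq hqn
      by_cases hqe : q = p
      · subst hqe; exact Bool.eq_false_iff.mpr hp
      · exact hprev q hq (by simp [hqe, hqn])

theorem pvCore_eq (cs : List Char) : stripA_go cs pvPrefixesA = stripB_core cs :=
  pvGo_eq cs pvPrefixesA (fun _ h => h) (fun p hp hnp => absurd hp hnp)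

-- ===== VERDICT (by name: the statement is the Claim_ definition above) =====
theorem strip_field_type_prefix_spec : Claim_equal_strip_field_type_prefix := by
  intro key _
  unfold Spec_strip_field_type_prefix strip_field_type_prefix strip_field_type_prefix_alt
  exact congrArg String.ofList (pvCore_eq key.toList)
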